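-- pv_equiv track=rewrite | github.com/CodyBuilder-dev/Algorithm-Coding-Test | problems/programmers/lv2/pgs-42860.py | choice_lr
-- ===== SOURCE A (Python) =====
-- def choice_lr(name,index) :
--     # right
--     right_len = 0
--     i,j = index,index
--     while name[i] == 'A' :
--         if (right_len) > len(name) :
--             return -987654321
--         i = (i+1) % len(name)
--         right_len +=1
--
--     # left
--     left_len = 0
--     while name[j] == 'A':
--         if (left_len) > len(name):
--             return -987654321
--         j = (j - 1) % len(name)
--         left_len += 1
--     return -1*left_len if left_len < right_len else right_len
-- ===== SOURCE B (Python) =====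
-- def choice_lr(name, index):
--     if name[index] != 'A':
--         return 0
--     n = len(name)
--     positions = [p for p in range(n) if name[p] != 'A']
--     if not positions:
--         return -987654321
--     idx = index % n
--     right_len = min((p - idx) % n for p in positions)
--     left_len = min((idx - p) % n for p in positions)
--     return -left_len if left_len < right_len else right_len
-- ===== Notes on version B (the rewrite author's own statement) =====
-- stated objective: alternative
-- what changed: Replaced A's two directional while-loop walks over the cyclic string by a single pass that collects all non-'A' positions and takes cyclic-distance minima ((p-idx)%n and (idx-p)%n) over that list.
import Mathlib
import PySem

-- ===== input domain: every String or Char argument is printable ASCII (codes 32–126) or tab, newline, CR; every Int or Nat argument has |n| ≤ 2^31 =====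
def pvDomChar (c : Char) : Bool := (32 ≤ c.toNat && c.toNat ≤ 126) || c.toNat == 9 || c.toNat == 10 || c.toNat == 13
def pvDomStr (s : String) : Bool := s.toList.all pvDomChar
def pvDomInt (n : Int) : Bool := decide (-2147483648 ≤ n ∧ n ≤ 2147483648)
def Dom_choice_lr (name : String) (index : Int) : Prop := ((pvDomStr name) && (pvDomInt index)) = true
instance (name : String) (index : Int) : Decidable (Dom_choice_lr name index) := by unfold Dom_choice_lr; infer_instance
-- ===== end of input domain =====

-- B replaces A's two directional cyclic walks by a single pass that collects the non-'A'
-- positions and takes cyclic-distance minima over them (objective: alternative decomposition).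

-- ===== PORT A =====
-- A's first while loop: walk right from i counting rlen; `none` is the sentinel return -987654321.
-- ((pyGet? …).getD '?' stands for name[i]; pyGet? = none is Python's IndexError, excluded by Pre_.)
def pvWalkR (cs : List Char) (i : Int) (rlen : Nat) : Option Nat :=
  if (PySem.List.pyGet? cs i).getD '?' = 'A' then
    if rlen > cs.length then none
    else pvWalkR cs (PySem.Int.mod (i + 1) cs.length) (rlen + 1)
  else some rlen
termination_by cs.length + 2 - rlen
decreasing_by simp_all; omega


-- A's second while loop: walk left from j counting llen.
def pvWalkL (cs : List Char) (j : Int) (llen : Nat) : Option Nat :=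
  if (PySem.List.pyGet? cs j).getD '?' = 'A' then
    if llen > cs.length then none
    else pvWalkL cs (PySem.Int.mod (j - 1) cs.length) (llen + 1)
  else some llen
termination_by cs.length + 2 - llen
decreasing_by simp_all; omega


def choice_lr (name : String) (index : Int) : Int :=
  let cs := name.toList
  match pvWalkR cs index 0 with
  | none => -987654321
  | some rlen =>
    match pvWalkL cs index 0 with
    | none => -987654321
    | some llen =>
      if llen < rlen then -1 * (llen : Int) else (rlen : Int)

def choice_lr_alt (name : String) (index : Int) : Int :=
  let cs := name.toList
  if (PySem.List.pyGet? cs index).getD '?' ≠ 'A' then 0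
  else
    let n : Int := PySem.List.len cs
    let positions := (PySem.List.pyRange 0 n 1).filter
      (fun p => (PySem.List.pyGet? cs p).getD '?' ≠ 'A')
    if positions.isEmpty then -987654321
    else
      let idx := PySem.Int.mod index n
      let rightLen := (PySem.List.min? (positions.map (fun p => PySem.Int.mod (p - idx) n))
        (fun x => x)).getD 0
      let leftLen := (PySem.List.min? (positions.map (fun p => PySem.Int.mod (idx - p) n))
        (fun x => x)).getD 0
      if leftLen < rightLen then -leftLen else rightLen


-- ===== PRECONDITION & SPEC =====
-- A raises IndexError exactly when name[index] is out of range (in particular on the empty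
-- string); only those inputs are excluded.
def Pre_choice_lr (name : String) (index : Int) : Prop :=
  PySem.Raise.InRange name.toList.length index
instance (name : String) (index : Int) : Decidable (Pre_choice_lr name index) := by
  unfold Pre_choice_lr; infer_instance
def pvWitness_choice_lr : String × Int := ("BAAB", -2)

def Spec_choice_lr (name : String) (index : Int) (out : Int) : Prop := out = choice_lr_alt name index
instance (name : String) (index : Int) (out : Int) : Decidable (Spec_choice_lr name index out) := by
  unfold Spec_choice_lr; infer_instance

-- ===== CLAIM (what is proved, stated in full; the proofs are below) =====
def Claim_equal_choice_lr : Prop := ∀ (name : String) (index : Int), Dom_choice_lr name index → Pre_choice_lr name index → Spec_choice_lr name index (choice_lr name index)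

-- ===== LEMMAS AND PROOFS =====

def pvChar (cs : List Char) (i : Int) : Char := cs.getD (i % (cs.length : Int)).toNat '?'

theorem pvChar_congr (cs : List Char) {a b : Int}
    (h : a % (cs.length : Int) = b % (cs.length : Int)) : pvChar cs a = pvChar cs b := by
  unfold pvChar; rw [h]

theorem pvChar_modL_add (cs : List Char) (a b : Int) :
    pvChar cs (a % (cs.length : Int) + b) = pvChar cs (a + b) := by
  refine pvChar_congr cs ?_
  rw [Int.add_emod (a % _) b, Int.emod_emod_of_dvd _ dvd_rfl, ← Int.add_emod]

theorem pvChar_modL_sub (cs : List Char) (a b : Int) :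
    pvChar cs (a % (cs.length : Int) - b) = pvChar cs (a - b) := by
  refine pvChar_congr cs ?_
  rw [Int.sub_emod (a % _) b, Int.emod_emod_of_dvd _ dvd_rfl, ← Int.sub_emod]

theorem pvChar_add_modR (cs : List Char) (a b : Int) :
    pvChar cs (a + b % (cs.length : Int)) = pvChar cs (a + b) := by
  refine pvChar_congr cs ?_
  rw [Int.add_emod a (b % _), Int.emod_emod_of_dvd _ dvd_rfl, ← Int.add_emod]

theorem pvChar_sub_modR (cs : List Char) (a b : Int) :
    pvChar cs (a - b % (cs.length : Int)) = pvChar cs (a - b) := by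
  refine pvChar_congr cs ?_
  rw [Int.sub_emod a (b % _), Int.emod_emod_of_dvd _ dvd_rfl, ← Int.sub_emod]

theorem pvChar_get (cs : List Char) (i : Int) (h : PySem.Raise.InRange cs.length i) :
    (PySem.List.pyGet? cs i).getD '?' = pvChar cs i := by
  obtain ⟨h1, h2⟩ := h
  by_cases hi : 0 ≤ i
  · rw [PySem.List.pyGet?_of_nonneg cs hi]
    unfold pvChar
    rw [Int.emod_eq_of_lt hi h2]
    simp [List.getD]
  · push Not at hi
    have hn : 0 < cs.length := by omega
    have hk : i = -(((-i).toNat : Int)) := by omega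
    have h3 : (i + (cs.length : Int)) % (cs.length : Int) = i + cs.length :=
      Int.emod_eq_of_lt (by omega) (by omega)
    have h4 := Int.add_mul_emod_self_left (a := i) (b := (cs.length : Int)) (c := 1)
    rw [mul_one] at h4
    have hmod : i % (cs.length : Int) = i + cs.length := by rw [← h4, h3]
    unfold pvChar
    rw [hmod]
    have ht : (i + (cs.length : Int)).toNat = cs.length - (-i).toNat := by omega
    rw [ht]
    conv_lhs => rw [hk]
    rw [PySem.List.pyGet?_neg_natCast cs _ (by omega) (by omega)]
    simp [List.getD]


theorem pvWalkR_eq (cs : List Char) (i : Int) (rlen d : Nat)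
    (hi : PySem.Raise.InRange cs.length i)
    (hd : pvChar cs (i + d) ≠ 'A')
    (hmin : ∀ k : Nat, k < d → pvChar cs (i + k) = 'A')
    (hb : rlen + d ≤ cs.length) :
    pvWalkR cs i rlen = some (rlen + d) := by
  induction d generalizing i rlen with
  | zero =>
    rw [pvWalkR, if_neg]
    · simp
    · rw [pvChar_get cs i hi]
      simpa using hd
  | succ d ih =>
    have hn : 0 < cs.length := by omega
    have h0 : pvChar cs i = 'A' := by simpa using hmin 0 (by omega)
    rw [pvWalkR, if_pos, if_neg (by omega)]
    · have hmodpos : (0 : Int) < (cs.length : Int) := by exact_mod_cast hn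
      rw [PySem.Int.mod_eq_emod_of_pos hmodpos]
      have hres := ih (PySem.Int.mod (i + 1) cs.length) (rlen + 1) ?_ ?_ ?_ ?_
      · rw [PySem.Int.mod_eq_emod_of_pos hmodpos] at hres
        rw [hres]
        congr 1
        omega
      · rw [PySem.Int.mod_eq_emod_of_pos hmodpos]
        exact ⟨by have := Int.emod_nonneg (i + 1) (by omega : (cs.length : Int) ≠ 0); omega,
               Int.emod_lt_of_pos _ hmodpos⟩
      · rw [PySem.Int.mod_eq_emod_of_pos hmodpos, pvChar_modL_add]
        have : i + 1 + (d : Int) = i + ((d : Nat) + 1 : Nat) := by push_cast; ring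
        rw [this]
        exact hd
      · intro k hk
        rw [PySem.Int.mod_eq_emod_of_pos hmodpos, pvChar_modL_add]
        have : i + 1 + (k : Int) = i + ((k + 1 : Nat) : Int) := by push_cast; ring
        rw [this]
        exact hmin (k + 1) (by omega)
      · omega
    · rw [pvChar_get cs i hi, h0]


theorem pvWalkL_eq (cs : List Char) (j : Int) (llen d : Nat)
    (hj : PySem.Raise.InRange cs.length j)
    (hd : pvChar cs (j - d) ≠ 'A')
    (hmin : ∀ k : Nat, k < d → pvChar cs (j - k) = 'A')
    (hb : llen + d ≤ cs.length) :
    pvWalkL cs j llen = some (llen + d) := by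
  induction d generalizing j llen with
  | zero =>
    rw [pvWalkL, if_neg]
    · simp
    · rw [pvChar_get cs j hj]
      simpa using hd
  | succ d ih =>
    have hn : 0 < cs.length := by omega
    have h0 : pvChar cs j = 'A' := by simpa using hmin 0 (by omega)
    rw [pvWalkL, if_pos, if_neg (by omega)]
    · have hmodpos : (0 : Int) < (cs.length : Int) := by exact_mod_cast hn
      rw [PySem.Int.mod_eq_emod_of_pos hmodpos]
      have hres := ih (PySem.Int.mod (j - 1) cs.length) (llen + 1) ?_ ?_ ?_ ?_
      · rw [PySem.Int.mod_eq_emod_of_pos hmodpos] at hres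
        rw [hres]
        congr 1
        omega
      · rw [PySem.Int.mod_eq_emod_of_pos hmodpos]
        exact ⟨by have := Int.emod_nonneg (j - 1) (by omega : (cs.length : Int) ≠ 0); omega,
               Int.emod_lt_of_pos _ hmodpos⟩
      · rw [PySem.Int.mod_eq_emod_of_pos hmodpos, pvChar_modL_sub]
        have : j - 1 - (d : Int) = j - ((d : Nat) + 1 : Nat) := by push_cast; ring
        rw [this]
        exact hd
      · intro k hk
        rw [PySem.Int.mod_eq_emod_of_pos hmodpos, pvChar_modL_sub]
        have : j - 1 - (k : Int) = j - ((k + 1 : Nat) : Int) := by push_cast; ring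
        rw [this]
        exact hmin (k + 1) (by omega)
      · omega
    · rw [pvChar_get cs j hj, h0]


theorem pvWalkR_allA (cs : List Char) (i : Int) (rlen : Nat)
    (hall : ∀ c ∈ cs, c = 'A') (hi : PySem.Raise.InRange cs.length i) :
    pvWalkR cs i rlen = none := by
  have main : ∀ m : Nat, ∀ i : Int, ∀ rlen : Nat, cs.length + 2 - rlen ≤ m →
      PySem.Raise.InRange cs.length i → pvWalkR cs i rlen = none := by
    intro m
    induction m with
    | zero =>
      intro i rlen hm hi
      rw [pvWalkR]
      have hgt : rlen > cs.length := by omega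
      obtain ⟨c, hc⟩ : ∃ c, PySem.List.pyGet? cs i = some c := by
        rcases h : PySem.List.pyGet? cs i with _ | c
        · rw [PySem.List.pyGet?_eq_none_iff] at h
          exact absurd hi h
        · exact ⟨c, rfl⟩
      have hcA := hall c (PySem.List.mem_of_pyGet?_eq_some _ hc)
      rw [hc]
      simp [hcA, hgt]
    | succ m ih =>
      intro i rlen hm hi
      have hn : 0 < cs.length := by obtain ⟨h1, h2⟩ := hi; omega
      obtain ⟨c, hc⟩ : ∃ c, PySem.List.pyGet? cs i = some c := by
        rcases h : PySem.List.pyGet? cs i with _ | c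
        · rw [PySem.List.pyGet?_eq_none_iff] at h
          exact absurd hi h
        · exact ⟨c, rfl⟩
      have hcA := hall c (PySem.List.mem_of_pyGet?_eq_some _ hc)
      rw [pvWalkR, hc]
      simp only [Option.getD_some, hcA, if_pos]
      by_cases hgt : rlen > cs.length
      · rw [if_pos hgt]
      · rw [if_neg hgt]
        have hmodpos : (0 : Int) < (cs.length : Int) := by exact_mod_cast hn
        refine ih _ (rlen + 1) (by omega) ?_
        rw [PySem.Int.mod_eq_emod_of_pos hmodpos]
        exact ⟨by have := Int.emod_nonneg (i + 1) (by omega : (cs.length : Int) ≠ 0); omega,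
               Int.emod_lt_of_pos _ hmodpos⟩
  exact main (cs.length + 2) i rlen (by omega) hi

theorem emod_subR (a b L : Int) : (a - b % L) % L = (a - b) % L := by
  rw [Int.sub_emod a (b % L), Int.emod_emod_of_dvd _ dvd_rfl, ← Int.sub_emod]

theorem emod_subL (a b L : Int) : (a % L - b) % L = (a - b) % L := by
  rw [Int.sub_emod (a % L) b, Int.emod_emod_of_dvd _ dvd_rfl, ← Int.sub_emod]

theorem pvChar_small (cs : List Char) (p : Int) (h1 : 0 ≤ p) (h2 : p < (cs.length : Int)) :
    pvChar cs p = cs.getD p.toNat '?' := by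
  unfold pvChar; rw [Int.emod_eq_of_lt h1 h2]

theorem pvChar_emod (cs : List Char) (a : Int) :
    pvChar cs (a % (cs.length : Int)) = pvChar cs a :=
  pvChar_congr cs (Int.emod_emod_of_dvd _ dvd_rfl)

theorem pvChar_right_shift (cs : List Char) (index p : Int) :
    pvChar cs (index + (p - index % (cs.length : Int)) % (cs.length : Int)) = pvChar cs p := by
  rw [pvChar_add_modR]
  have e : index + (p - index % (cs.length : Int)) = (index + p) - index % (cs.length : Int) := by
    ring
  rw [e, pvChar_sub_modR]
  have e2 : index + p - index = p := by ring
  rw [e2]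

theorem pvChar_left_shift (cs : List Char) (index p : Int) :
    pvChar cs (index - (index % (cs.length : Int) - p) % (cs.length : Int)) = pvChar cs p := by
  rw [pvChar_sub_modR]
  have e : index - (index % (cs.length : Int) - p) = (index + p) - index % (cs.length : Int) := by
    ring
  rw [e, pvChar_sub_modR]
  have e2 : index + p - index = p := by ring
  rw [e2]

theorem right_residue (index k L : Int) (h1 : 0 ≤ k) (h2 : k < L) :
    ((index + k) % L - index % L) % L = k := by
  rw [emod_subR ((index + k) % L) index L, emod_subL (index + k) index L]
  have e : index + k - index = k := by ring
  rw [e, Int.emod_eq_of_lt h1 h2]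

theorem left_residue (index k L : Int) (h1 : 0 ≤ k) (h2 : k < L) :
    (index % L - (index - k) % L) % L = k := by
  rw [emod_subR (index % L) (index - k) L, emod_subL index (index - k) L]
  have e : index - (index - k) = k := by ring
  rw [e, Int.emod_eq_of_lt h1 h2]

theorem main_eq (name : String) (index : Int)
    (hpre : PySem.Raise.InRange name.toList.length index) :
    choice_lr name index = choice_lr_alt name index := by
  have hn : 0 < name.toList.length := by obtain ⟨h1, h2⟩ := hpre; omega
  have hL : (0 : Int) < (name.toList.length : Int) := by exact_mod_cast hn
  have hLne : (name.toList.length : Int) ≠ 0 := by omega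
  have hget : (PySem.List.pyGet? name.toList index).getD '?' = pvChar name.toList index :=
    pvChar_get name.toList index hpre
  have hpred : ∀ p : Int, 0 ≤ p → p < (name.toList.length : Int) →
      ((PySem.List.pyGet? name.toList p).getD '?' = pvChar name.toList p) := fun p h1 h2 =>
    pvChar_get name.toList p ⟨by omega, h2⟩
  simp only [choice_lr, choice_lr_alt, PySem.List.len_eq, PySem.Int.mod_eq_emod_of_pos hL]
  by_cases hA : pvChar name.toList index = 'A'
  · rw [if_neg (by rw [hget]; exact not_not_intro hA)]
    by_cases hall : ∀ c ∈ name.toList, c = 'A'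
    · rw [pvWalkR_allA name.toList index 0 hall hpre]
      have hfil : (PySem.List.pyRange 0 (name.toList.length : Int) 1).filter
          (fun p => decide ((PySem.List.pyGet? name.toList p).getD '?' ≠ 'A')) = [] := by
        rw [List.filter_eq_nil_iff]
        intro p hp
        rw [PySem.List.mem_pyRange_one] at hp
        have h1 := hp.1
        have h2 := hp.2
        have hlt : p.toNat < name.toList.length := by omega
        simp only [hpred p h1 h2, pvChar_small name.toList p h1 h2,
          List.getD_eq_getElem name.toList '?' hlt]
        simpa using hall _ (List.getElem_mem hlt)
      rw [hfil]
      simp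
    · push Not at hall
      obtain ⟨c, hcmem, hcne⟩ := hall
      obtain ⟨p0, hp0, hgetp0⟩ := List.mem_iff_getElem.mp hcmem
      have hposmem : (p0 : Int) ∈ (PySem.List.pyRange 0 (name.toList.length : Int) 1).filter
          (fun p => decide ((PySem.List.pyGet? name.toList p).getD '?' ≠ 'A')) := by
        rw [List.mem_filter]
        refine ⟨by rw [PySem.List.mem_pyRange_one]; omega, ?_⟩
        have hb1 : (0 : Int) ≤ (p0 : Int) := by omega
        have hb2 : (p0 : Int) < (name.toList.length : Int) := by exact_mod_cast hp0
        simp only [hpred _ hb1 hb2, pvChar_small name.toList _ hb1 hb2, Int.toNat_natCast,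
          List.getD_eq_getElem name.toList '?' hp0, hgetp0]
        simpa using hcne
      set positions := (PySem.List.pyRange 0 (name.toList.length : Int) 1).filter
          (fun p => decide ((PySem.List.pyGet? name.toList p).getD '?' ≠ 'A')) with hposs
      have hne : positions ≠ [] := List.ne_nil_of_mem hposmem
      have hposchar : ∀ p ∈ positions,
          0 ≤ p ∧ p < (name.toList.length : Int) ∧ pvChar name.toList p ≠ 'A' := by
        intro p hp
        rw [hposs, List.mem_filter, PySem.List.mem_pyRange_one] at hp
        refine ⟨hp.1.1, hp.1.2, ?_⟩
        have h2 := hp.2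
        rw [hpred p hp.1.1 hp.1.2] at h2
        simpa using h2
      rw [if_neg (by simp [List.isEmpty_iff, hne])]
      obtain ⟨mR, hmR⟩ : ∃ mR, PySem.List.min? (positions.map
          (fun p => (p - index % (name.toList.length : Int)) % (name.toList.length : Int)))
          (fun x => x) = some mR := by
        rcases h : PySem.List.min? (positions.map
            (fun p => (p - index % (name.toList.length : Int)) % (name.toList.length : Int)))
            (fun x => x) with _ | mR
        · rw [PySem.List.min?_eq_none_iff] at h
          simp [hne] at h
        · exact ⟨mR, rfl⟩
      obtain ⟨mL, hmL⟩ : ∃ mL, PySem.List.min? (positions.map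
          (fun p => (index % (name.toList.length : Int) - p) % (name.toList.length : Int)))
          (fun x => x) = some mL := by
        rcases h : PySem.List.min? (positions.map
            (fun p => (index % (name.toList.length : Int) - p) % (name.toList.length : Int)))
            (fun x => x) with _ | mL
        · rw [PySem.List.min?_eq_none_iff] at h
          simp [hne] at h
        · exact ⟨mL, rfl⟩
      rw [hmR, hmL]
      -- representatives of the two minima
      obtain ⟨pR, hpR, hpRe⟩ := List.mem_map.mp (PySem.List.min?_mem hmR)
      obtain ⟨pL, hpL, hpLe⟩ := List.mem_map.mp (PySem.List.min?_mem hmL)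
      have hR0 : 0 ≤ mR := by rw [← hpRe]; exact Int.emod_nonneg _ hLne
      have hRlt : mR < (name.toList.length : Int) := by
        rw [← hpRe]; exact Int.emod_lt_of_pos _ hL
      have hL0 : 0 ≤ mL := by rw [← hpLe]; exact Int.emod_nonneg _ hLne
      have hLlt : mL < (name.toList.length : Int) := by
        rw [← hpLe]; exact Int.emod_lt_of_pos _ hL
      have hcastR : ((mR.toNat : Nat) : Int) = mR := Int.toNat_of_nonneg hR0
      have hcastL : ((mL.toNat : Nat) : Int) = mL := Int.toNat_of_nonneg hL0
      -- the walk lemmas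
      have hwalkR : pvWalkR name.toList index 0 = some (0 + mR.toNat) := by
        refine pvWalkR_eq name.toList index 0 mR.toNat hpre ?_ ?_ (by omega)
        · rw [hcastR, ← hpRe, pvChar_right_shift]
          exact (hposchar pR hpR).2.2
        · intro k hk
          by_contra hneA
          have hq0 : 0 ≤ (index + (k : Int)) % (name.toList.length : Int) :=
            Int.emod_nonneg _ hLne
          have hqlt : (index + (k : Int)) % (name.toList.length : Int) <
              (name.toList.length : Int) := Int.emod_lt_of_pos _ hL
          have hqpos : (index + (k : Int)) % (name.toList.length : Int) ∈ positions := by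
            rw [hposs, List.mem_filter]
            refine ⟨by rw [PySem.List.mem_pyRange_one]; omega, ?_⟩
            rw [hpred _ hq0 hqlt, pvChar_emod]
            simpa using hneA
          have hle := PySem.List.min?_isMin hmR _ (List.mem_map.mpr ⟨_, hqpos, rfl⟩)
          rw [right_residue index (k : Int) (name.toList.length : Int) (by omega)
            (by omega)] at hle
          omega
      have hwalkL : pvWalkL name.toList index 0 = some (0 + mL.toNat) := by
        refine pvWalkL_eq name.toList index 0 mL.toNat hpre ?_ ?_ (by omega)
        · rw [hcastL, ← hpLe, pvChar_left_shift]
          exact (hposchar pL hpL).2.2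
        · intro k hk
          by_contra hneA
          have hq0 : 0 ≤ (index - (k : Int)) % (name.toList.length : Int) :=
            Int.emod_nonneg _ hLne
          have hqlt : (index - (k : Int)) % (name.toList.length : Int) <
              (name.toList.length : Int) := Int.emod_lt_of_pos _ hL
          have hqpos : (index - (k : Int)) % (name.toList.length : Int) ∈ positions := by
            rw [hposs, List.mem_filter]
            refine ⟨by rw [PySem.List.mem_pyRange_one]; omega, ?_⟩
            rw [hpred _ hq0 hqlt, pvChar_emod]
            simpa using hneA
          have hle := PySem.List.min?_isMin hmL _ (List.mem_map.mpr ⟨_, hqpos, rfl⟩)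
          rw [left_residue index (k : Int) (name.toList.length : Int) (by omega)
            (by omega)] at hle
          omega
      rw [hwalkR, hwalkL]
      simp only [Option.getD_some, Nat.zero_add]
      split_ifs <;> omega
  · rw [pvWalkR, pvWalkL, hget, if_neg hA, if_neg hA, if_pos hA]
    norm_num

-- ===== VERDICT (by name: the statement is the Claim_ definition above) =====
theorem choice_lr_spec : Claim_equal_choice_lr := by
  intro name index _ hpre
  unfold Pre_choice_lr at hpre
  unfold Spec_choice_lr
  exact main_eq name index hpre
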